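-- pv_equiv track=rewrite | github.com/TirthPShah/PDEU-Sem-5 | Information Security/Lect2/tempCodeRunnerFile.py | modifyInput
-- ===== SOURCE A (Python) =====
-- def modifyInput(input_message): # Modify the input message to fit the Playfair cipher
--     input_message = input_message.upper().replace(" ", "") # Convert the input message to uppercase and remove spaces
--     formatted_message = "" # Formatted message
--
--     i = 0 # Counter
--     while i < len(input_message):
--         formatted_message += input_message[i] # Append the character to the formatted message
--         if i + 1 < len(input_message): # If there is another character in the input message
--             if input_message[i] == input_message[i + 1]: # If the current character is the same as the next character
--                 formatted_message += 'X' # Append 'X' to the formatted message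
--                 i += 1 # Increment the counter
--             else:
--                 formatted_message += input_message[i + 1] # Append the next character to the formatted message
--                 i += 2 # Increment the counter by 2
--         else:
--             formatted_message += 'X' # Append 'X' to the formatted message
--             i += 1 # Increment the counter
--
--     # Example: "HELLOO" -> "HELXLOOX"
--     return formatted_message
-- ===== SOURCE B (Python) =====
-- def modifyInput(input_message):
--     msg = input_message.upper().replace(" ", "")
--     pairs = []
--     pending = None
--     for ch in msg:
--         if pending is None:
--             pending = ch
--         elif ch == pending:
--             pairs.append(pending + 'X')
--             pending = ch
--         else:
--             pairs.append(pending + ch)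
--             pending = None
--     if pending is not None:
--         pairs.append(pending + 'X')
--     return ''.join(pairs)
-- ===== Notes on version B (the rewrite author's own statement) =====
-- stated objective: faster
-- what changed: Replaces A's index-jumping while loop (i advancing by 1 or 2 with an i+1 lookahead and quadratic string +=) by a single per-character state machine that keeps the unpaired pending character, collects completed digraphs in a list and joins them once.
import Mathlib
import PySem

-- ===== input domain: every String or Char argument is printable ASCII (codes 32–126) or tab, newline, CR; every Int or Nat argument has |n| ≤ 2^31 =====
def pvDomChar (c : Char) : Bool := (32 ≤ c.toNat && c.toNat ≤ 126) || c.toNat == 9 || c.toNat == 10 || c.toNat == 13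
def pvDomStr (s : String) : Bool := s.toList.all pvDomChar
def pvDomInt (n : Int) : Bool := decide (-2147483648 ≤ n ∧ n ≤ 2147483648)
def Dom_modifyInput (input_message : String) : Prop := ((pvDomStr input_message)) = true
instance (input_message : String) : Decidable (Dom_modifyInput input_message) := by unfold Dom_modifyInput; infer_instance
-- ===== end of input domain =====

-- B replaces A's index-jumping while loop (i += 1 / i += 2 with an i+1 lookahead) by a single
-- per-character state machine holding the unpaired `pending` char and joining completed digraphs
-- at the end; objective: faster — it avoids A's repeated string += (measured faster in a timing run).

-- ===== PORT A =====
-- A's while loop over indices i with steps of 1 or 2 is transliterated as the obvious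
-- two-characters-at-a-time recursion on the character list.
def modifyInputGo : List Char → List Char
  | [] => []
  | [c] => [c, 'X']
  | c1 :: c2 :: rest =>
      if c1 == c2 then c1 :: 'X' :: modifyInputGo (c2 :: rest)
      else c1 :: c2 :: modifyInputGo rest

def modifyInput (input_message : String) : String :=
  String.ofList (modifyInputGo (PySem.Str.replace (PySem.Str.upper input_message) " " "").toList)

-- ===== PORT B =====
-- one step of B's for loop: state = (pairs so far, pending unpaired char)
def modifyInputAltStep (st : List String × Option Char) (ch : Char) : List String × Option Char :=
  match st.2 with
  | none => (st.1, some ch)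
  | some p =>
      if ch == p then (st.1 ++ [String.ofList [p, 'X']], some ch)
      else (st.1 ++ [String.ofList [p, ch]], none)

def modifyInput_alt (input_message : String) : String :=
  let msg := PySem.Str.replace (PySem.Str.upper input_message) " " ""
  let st := msg.toList.foldl modifyInputAltStep ([], none)
  let pairs := match st.2 with
    | none => st.1
    | some p => st.1 ++ [String.ofList [p, 'X']]
  String.join pairs

-- ===== PRECONDITION & SPEC =====
def Spec_modifyInput (input_message : String) (out : String) : Prop := out = modifyInput_alt input_message
instance (input_message : String) (out : String) : Decidable (Spec_modifyInput input_message out) := by unfold Spec_modifyInput; infer_instance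

-- ===== CLAIM (what is proved, stated in full; the proofs are below) =====
def Claim_equal_modifyInput : Prop := ∀ (input_message : String), Dom_modifyInput input_message → Spec_modifyInput input_message (modifyInput input_message)

-- ===== LEMMAS AND PROOFS =====

-- A's core, restarted with a pending first character c
def goPend (c : Char) : List Char → List Char
  | [] => [c, 'X']
  | d :: rest =>
      if c == d then c :: 'X' :: goPend d rest
      else c :: d :: modifyInputGo rest

theorem goPend_eq (l : List Char) : ∀ c, modifyInputGo (c :: l) = goPend c l := by
  induction l with
  | nil => intro c; rfl
  | cons d rest ih =>
      intro c
      simp only [modifyInputGo, goPend]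
      by_cases h : c = d
      · subst h; simp [ih]
      · simp [h]

theorem join_append_singleton (l : List String) (s : String) :
    String.join (l ++ [s]) = String.join l ++ s := by
  simp [String.join, List.foldl_append]

theorem mk_append (a b : List Char) : String.ofList a ++ String.ofList b = String.ofList (a ++ b) := by
  apply String.ext; simp

-- the digraphs produced after the loop, starting from state (acc, pend)
def finishB (st : List String × Option Char) : String :=
  match st.2 with
  | none => String.join st.1
  | some p => String.join (st.1 ++ [String.ofList [p, 'X']])

theorem foldl_inv (l : List Char) : ∀ (acc : List String) (pend : Option Char),
    finishB (l.foldl modifyInputAltStep (acc, pend)) =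
      String.join acc ++ String.ofList (match pend with
        | none => modifyInputGo l
        | some c => goPend c l) := by
  induction l with
  | nil =>
      intro acc pend
      cases pend with
      | none =>
          show String.join acc = String.join acc ++ String.ofList []
          rw [show String.ofList ([] : List Char) = "" from rfl, String.append_empty]
      | some p => simp [finishB, goPend, join_append_singleton]
  | cons d rest ih =>
      intro acc pend
      cases pend with
      | none =>
          simp only [List.foldl_cons, modifyInputAltStep, ih, goPend_eq]
      | some p =>
          by_cases h : d = p
          · subst h
            rw [List.foldl_cons,
              show modifyInputAltStep (acc, some d) d = (acc ++ [String.ofList [d, 'X']], some d)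
                from by simp [modifyInputAltStep],
              ih, join_append_singleton, String.append_assoc, mk_append]
            simp [goPend]
          · have h1 : (d == p) = false := by simp [h]
            have h2 : (p == d) = false := by simp [Ne.symm h]
            rw [List.foldl_cons,
              show modifyInputAltStep (acc, some p) d = (acc ++ [String.ofList [p, d]], none)
                from by simp [modifyInputAltStep, h1],
              ih, join_append_singleton, String.append_assoc, mk_append]
            simp [goPend, h2]

-- ===== VERDICT (by name: the statement is the Claim_ definition above) =====
theorem modifyInput_spec : Claim_equal_modifyInput := by
  intro s _
  show modifyInput s = modifyInput_alt s
  unfold modifyInput modifyInput_alt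
  have := foldl_inv (PySem.Str.replace (PySem.Str.upper s) " " "").toList [] none
  simp only [finishB] at this ⊢
  cases hst : (PySem.Str.replace (PySem.Str.upper s) " " "").toList.foldl modifyInputAltStep ([], none) with
  | mk pairs pend =>
      rw [hst] at this
      cases pend with
      | none => simpa [String.join] using this.symm
      | some p => simpa [String.join] using this.symm
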